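-- pv_equiv track=rewrite | github.com/MateusAlcantara13/student-grades-analyzer | main.py | maiorNota_menorNota_posMaior_posMenor
-- ===== SOURCE A (Python) =====
-- def maiorNota_menorNota_posMaior_posMenor(notas):
--
--     maiorNota = notas[0]
--     menorNota = notas[0]
--     posMaior = 1
--     posMenor = 1
--
--     # enumerate → percorre lista com índice e valor
--     for i, valor in enumerate(notas):
--         if valor > maiorNota:
--             maiorNota = valor
--             posMaior = i + 1
--
--         if valor < menorNota:
--             menorNota = valor
--             posMenor = i + 1
--
--     # Retorno múltiplo (desempacotamento)
--     return maiorNota, menorNota, posMaior, posMenor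
-- ===== SOURCE B (Python) =====
-- def maiorNota_menorNota_posMaior_posMenor(notas):
--     maiorNota = max(notas)
--     menorNota = min(notas)
--     return maiorNota, menorNota, notas.index(maiorNota) + 1, notas.index(menorNota) + 1
-- ===== Notes on version B (the rewrite author's own statement) =====
-- stated objective: idiomatic
-- what changed: Replaces the fused single-pass loop tracking four running variables with builtin max/min reductions plus first-occurrence index searches (notas.index), returning the same four values.
import Mathlib
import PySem

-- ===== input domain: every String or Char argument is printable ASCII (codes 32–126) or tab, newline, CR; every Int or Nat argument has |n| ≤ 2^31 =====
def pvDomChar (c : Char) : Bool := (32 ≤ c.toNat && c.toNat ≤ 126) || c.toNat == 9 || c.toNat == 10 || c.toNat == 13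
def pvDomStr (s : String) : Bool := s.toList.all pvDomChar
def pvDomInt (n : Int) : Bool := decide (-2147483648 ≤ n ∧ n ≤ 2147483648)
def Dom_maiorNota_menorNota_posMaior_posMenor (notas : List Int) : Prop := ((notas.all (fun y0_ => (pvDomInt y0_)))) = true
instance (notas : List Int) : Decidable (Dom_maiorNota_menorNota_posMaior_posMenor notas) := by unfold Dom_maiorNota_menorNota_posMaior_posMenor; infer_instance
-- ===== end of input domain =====

-- B replaces A's fused single pass (four running variables) with max/min reductions plus
-- first-occurrence index searches; equally idiomatic cost, structurally different.


-- ===== PORT A =====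
-- A's loop body, tracking (maiorNota, posMaior) and (menorNota, posMenor).
-- notas[0] raises IndexError on []; that input is excluded by Pre_ (the [] branch value is junk).
def pvStepA (st : (Int × Int) × (Int × Int)) (p : Int × Int) : (Int × Int) × (Int × Int) :=
  ((if p.2 > st.1.1 then (p.2, p.1 + 1) else st.1),
   (if p.2 < st.2.1 then (p.2, p.1 + 1) else st.2))
def maiorNota_menorNota_posMaior_posMenor (notas : List Int) : Int × Int × Int × Int :=
  match notas with
  | [] => (0, 0, 0, 0)
  | h :: _ =>
    let r := (PySem.List.enumerate notas).foldl pvStepA ((h, 1), (h, 1))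
    (r.1.1, r.2.1, r.1.2, r.2.2)

-- ===== PORT B =====
-- Source B: max(notas), min(notas), notas.index(...) + 1 (getD defaults are only reached on [], outside Pre_).
def maiorNota_menorNota_posMaior_posMenor_alt (notas : List Int) : Int × Int × Int × Int :=
  let maiorNota := (PySem.List.max? notas (fun y => y)).getD 0
  let menorNota := (PySem.List.min? notas (fun y => y)).getD 0
  (maiorNota, menorNota,
   (((PySem.List.index? notas maiorNota).getD 0 : Nat) : Int) + 1,
   (((PySem.List.index? notas menorNota).getD 0 : Nat) : Int) + 1)

-- ===== PRECONDITION & SPEC =====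
-- Pre_ excludes only the empty list, on which A raises IndexError (and B raises ValueError).
def Pre_maiorNota_menorNota_posMaior_posMenor (notas : List Int) : Prop := notas ≠ []
instance (notas : List Int) : Decidable (Pre_maiorNota_menorNota_posMaior_posMenor notas) := by unfold Pre_maiorNota_menorNota_posMaior_posMenor; infer_instance
def pvWitness_maiorNota_menorNota_posMaior_posMenor : List Int := [3, 7, 7, 1, 1, 5]

def Spec_maiorNota_menorNota_posMaior_posMenor (notas : List Int) (out : Int × Int × Int × Int) : Prop := out = maiorNota_menorNota_posMaior_posMenor_alt notas
instance (notas : List Int) (out : Int × Int × Int × Int) : Decidable (Spec_maiorNota_menorNota_posMaior_posMenor notas out) := by unfold Spec_maiorNota_menorNota_posMaior_posMenor; infer_instance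

-- ===== CLAIM (what is proved, stated in full; the proofs are below) =====
def Claim_equal_maiorNota_menorNota_posMaior_posMenor : Prop := ∀ (notas : List Int), Dom_maiorNota_menorNota_posMaior_posMenor notas → Pre_maiorNota_menorNota_posMaior_posMenor notas → Spec_maiorNota_menorNota_posMaior_posMenor notas (maiorNota_menorNota_posMaior_posMenor notas)

-- ===== LEMMAS AND PROOFS =====
-- A's fold with its two independent (value, position) accumulators is two folds.
lemma foldA_split (l : List (Int × Int)) (s1 s2 : Int × Int) :
    l.foldl pvStepA (s1, s2)
    = (l.foldl (fun (s : Int × Int) (p : Int × Int) => if p.2 > s.1 then (p.2, p.1 + 1) else s) s1,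
       l.foldl (fun (s : Int × Int) (p : Int × Int) => if p.2 < s.1 then (p.2, p.1 + 1) else s) s2) :=
  PySem.List.foldl_prod_mk
    (fun (s : Int × Int) (p : Int × Int) => if p.2 > s.1 then (p.2, p.1 + 1) else s)
    (fun (s : Int × Int) (p : Int × Int) => if p.2 < s.1 then (p.2, p.1 + 1) else s) l s1 s2


-- A's max-tracking half over an enumerated suffix: the running max becomes foldl max, and the
-- recorded position is pMa if no element beats ma, else the first occurrence of the max (offset k, 1-based).
lemma foldMax_enum (t : List Int) (k ma pMa : Int) :
    (PySem.List.enumerate t k).foldl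
      (fun (s : Int × Int) (p : Int × Int) => if p.2 > s.1 then (p.2, p.1 + 1) else s) (ma, pMa)
    = (t.foldl max ma,
       if t.foldl max ma = ma then pMa
       else k + (((PySem.List.index? t (t.foldl max ma)).getD 0 : Nat) : Int) + 1) := by
  induction t generalizing k ma pMa with
  | nil => simp [PySem.List.enumerate]
  | cons v t ih =>
    rw [PySem.List.enumerate_cons, List.foldl_cons]
    by_cases hv : ma < v
    · have hstep : (if (k, v).2 > (ma, pMa).1 then ((k, v).2, (k, v).1 + 1) else (ma, pMa)) = (v, k + 1) := by
        simp [hv]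
      rw [hstep, ih, List.foldl_cons, max_eq_right hv.le]
      have hvM : v ≤ t.foldl max v := (PySem.List.le_foldl_max t v).1
      have hMa : t.foldl max v ≠ ma := by omega
      by_cases hM : t.foldl max v = v
      · rw [hM] at hMa ⊢
        rw [if_pos rfl, if_neg hMa, PySem.List.index?_cons_self]
        simp
      · have hmem : t.foldl max v ∈ t := (PySem.List.foldl_max_mem t v).resolve_left hM
        obtain ⟨j, hj⟩ := Option.isSome_iff_exists.mp ((PySem.List.index?_isSome_iff t _).mpr hmem)
        rw [PySem.List.index?_cons_of_ne t (Ne.symm hM), if_neg hM, if_neg hMa, hj]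
        simp only [Option.map_some, Option.getD_some]
        refine Prod.ext rfl ?_
        push_cast
        ring
    · have hstep : (if (k, v).2 > (ma, pMa).1 then ((k, v).2, (k, v).1 + 1) else (ma, pMa)) = (ma, pMa) := by
        simp [hv]
      rw [hstep, ih, List.foldl_cons, max_eq_left (not_lt.mp hv)]
      by_cases hM : t.foldl max ma = ma
      · simp [hM]
      · have hmaM : ma ≤ t.foldl max ma := (PySem.List.le_foldl_max t ma).1
        have hvM : t.foldl max ma ≠ v := by
          have := not_lt.mp hv; omega
        have hmem : t.foldl max ma ∈ t := (PySem.List.foldl_max_mem t ma).resolve_left hM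
        obtain ⟨j, hj⟩ := Option.isSome_iff_exists.mp ((PySem.List.index?_isSome_iff t _).mpr hmem)
        rw [PySem.List.index?_cons_of_ne t (Ne.symm hvM), if_neg hM, if_neg hM, hj]
        simp only [Option.map_some, Option.getD_some]
        refine Prod.ext rfl ?_
        push_cast
        ring

-- Mirror lemma for the min-tracking half.
lemma foldMin_enum (t : List Int) (k ma pMa : Int) :
    (PySem.List.enumerate t k).foldl
      (fun (s : Int × Int) (p : Int × Int) => if p.2 < s.1 then (p.2, p.1 + 1) else s) (ma, pMa)
    = (t.foldl min ma,
       if t.foldl min ma = ma then pMa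
       else k + (((PySem.List.index? t (t.foldl min ma)).getD 0 : Nat) : Int) + 1) := by
  induction t generalizing k ma pMa with
  | nil => simp [PySem.List.enumerate]
  | cons v t ih =>
    rw [PySem.List.enumerate_cons, List.foldl_cons]
    by_cases hv : v < ma
    · have hstep : (if (k, v).2 < (ma, pMa).1 then ((k, v).2, (k, v).1 + 1) else (ma, pMa)) = (v, k + 1) := by
        simp [hv]
      rw [hstep, ih, List.foldl_cons, min_eq_right hv.le]
      have hvM : t.foldl min v ≤ v := (PySem.List.foldl_min_le t v).1
      have hMa : t.foldl min v ≠ ma := by omega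
      by_cases hM : t.foldl min v = v
      · rw [hM] at hMa ⊢
        rw [if_pos rfl, if_neg hMa, PySem.List.index?_cons_self]
        simp
      · have hmem : t.foldl min v ∈ t := (PySem.List.foldl_min_mem t v).resolve_left hM
        obtain ⟨j, hj⟩ := Option.isSome_iff_exists.mp ((PySem.List.index?_isSome_iff t _).mpr hmem)
        rw [PySem.List.index?_cons_of_ne t (Ne.symm hM), if_neg hM, if_neg hMa, hj]
        simp only [Option.map_some, Option.getD_some]
        refine Prod.ext rfl ?_
        push_cast
        ring
    · have hstep : (if (k, v).2 < (ma, pMa).1 then ((k, v).2, (k, v).1 + 1) else (ma, pMa)) = (ma, pMa) := by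
        simp [hv]
      rw [hstep, ih, List.foldl_cons, min_eq_left (not_lt.mp hv)]
      by_cases hM : t.foldl min ma = ma
      · simp [hM]
      · have hmaM : t.foldl min ma ≤ ma := (PySem.List.foldl_min_le t ma).1
        have hvM : t.foldl min ma ≠ v := by
          have := not_lt.mp hv; omega
        have hmem : t.foldl min ma ∈ t := (PySem.List.foldl_min_mem t ma).resolve_left hM
        obtain ⟨j, hj⟩ := Option.isSome_iff_exists.mp ((PySem.List.index?_isSome_iff t _).mpr hmem)
        rw [PySem.List.index?_cons_of_ne t (Ne.symm hvM), if_neg hM, if_neg hM, hj]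
        simp only [Option.map_some, Option.getD_some]
        refine Prod.ext rfl ?_
        push_cast
        ring


-- ===== VERDICT (by name: the statement is the Claim_ definition above) =====
theorem maiorNota_menorNota_posMaior_posMenor_spec : Claim_equal_maiorNota_menorNota_posMaior_posMenor := by
  intro notas _ hpre
  unfold Spec_maiorNota_menorNota_posMaior_posMenor
  revert hpre
  show notas ≠ [] → _
  intro hpre
  cases notas with
  | nil => exact absurd rfl hpre
  | cons h t =>
    simp only [maiorNota_menorNota_posMaior_posMenor, maiorNota_menorNota_posMaior_posMenor_alt]
    rw [PySem.List.max?_id_cons, PySem.List.min?_id_cons]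
    simp only [Option.getD_some]
    rw [PySem.List.enumerate_cons, List.foldl_cons,
        show pvStepA ((h, 1), (h, 1)) (0, h) = ((h, 1), (h, 1)) by simp [pvStepA]]
    rw [foldA_split, foldMax_enum, foldMin_enum]
    by_cases hM : t.foldl max h = h <;> by_cases hm : t.foldl min h = h
    · rw [hM, hm, PySem.List.index?_cons_self h t]
      simp
    · have hmmem : t.foldl min h ∈ t := (PySem.List.foldl_min_mem t h).resolve_left hm
      obtain ⟨j2, hj2⟩ := Option.isSome_iff_exists.mp ((PySem.List.index?_isSome_iff t _).mpr hmmem)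
      rw [hM, PySem.List.index?_cons_self h t,
          PySem.List.index?_cons_of_ne t (Ne.symm hm), hj2]
      simp [hm, Prod.ext_iff]
      omega
    · have hMmem : t.foldl max h ∈ t := (PySem.List.foldl_max_mem t h).resolve_left hM
      obtain ⟨j, hj⟩ := Option.isSome_iff_exists.mp ((PySem.List.index?_isSome_iff t _).mpr hMmem)
      rw [hm, PySem.List.index?_cons_self h t,
          PySem.List.index?_cons_of_ne t (Ne.symm hM), hj]
      simp [hM, Prod.ext_iff]
      omega
    · have hMmem : t.foldl max h ∈ t := (PySem.List.foldl_max_mem t h).resolve_left hM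
      have hmmem : t.foldl min h ∈ t := (PySem.List.foldl_min_mem t h).resolve_left hm
      obtain ⟨j, hj⟩ := Option.isSome_iff_exists.mp ((PySem.List.index?_isSome_iff t _).mpr hMmem)
      obtain ⟨j2, hj2⟩ := Option.isSome_iff_exists.mp ((PySem.List.index?_isSome_iff t _).mpr hmmem)
      rw [PySem.List.index?_cons_of_ne t (Ne.symm hM),
          PySem.List.index?_cons_of_ne t (Ne.symm hm), hj, hj2]
      simp [hM, hm, Prod.ext_iff]
      omega
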